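-- pv_equiv track=rewrite | github.com/astrofra/lib-say | bin/generate-reference-en.py | normalize_mary_phone_string
-- ===== SOURCE A (Python) =====
-- MARY_PHONE_MAP = {
--     "@": ["SCHWA"],
--     "@U": ["OH", "W"],
--     "A": ["A"],
--     "AI": ["AH", "J"],
--     "D": ["DH"],
--     "E": ["EH"],
--     "EI": ["E", "J"],
--     "I": ["IH"],
--     "N": ["NG"],
--     "O": ["OH"],
--     "OI": ["OH", "J"],
--     "S": ["SH"],
--     "T": ["TH"],
--     "U": ["U"],
--     "V": ["AH"],
--     "Z": ["ZH"],
--     "aU": ["AH", "W"],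
--     "b": ["B"],
--     "d": ["D"],
--     "dZ": ["JH"],
--     "f": ["F"],
--     "g": ["G"],
--     "h": ["H"],
--     "i": ["I"],
--     "j": ["J"],
--     "k": ["K"],
--     "l": ["L"],
--     "m": ["M"],
--     "n": ["N"],
--     "p": ["P"],
--     "r": ["R"],
--     "r=": ["R"],
--     "s": ["S"],
--     "t": ["T"],
--     "tS": ["CH"],
--     "u": ["U"],
--     "v": ["V"],
--     "w": ["W"],
--     "z": ["Z"],
--     "{": ["AE"],
-- }
--
-- def normalize_mary_phone_string(raw: str) -> tuple[list[str], list[int], list[str]]: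
--     tokens: list[str] = []
--     stress_positions: list[int] = []
--     unknown_tokens: list[str] = []
--     stress_next = False
--
--     for raw_token in raw.split():
--         token = raw_token.strip()
--         if not token or token == "-":
--             continue
--         if token == "'":
--             stress_next = True
--             continue
--         mapped = MARY_PHONE_MAP.get(token)
--         if mapped is None:
--             unknown_tokens.append(token)
--             mapped = [f"?{token}"]
--         for mapped_token in mapped:
--             tokens.append(mapped_token)
--             if stress_next:
--                 stress_positions.append(len(tokens) - 1)
--                 stress_next = False
--
--     return tokens, stress_positions, unknown_tokens
-- ===== SOURCE B (Python) =====
-- MARY_PHONE_MAP = {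
--     "@": ["SCHWA"], "@U": ["OH", "W"], "A": ["A"], "AI": ["AH", "J"],
--     "D": ["DH"], "E": ["EH"], "EI": ["E", "J"], "I": ["IH"], "N": ["NG"],
--     "O": ["OH"], "OI": ["OH", "J"], "S": ["SH"], "T": ["TH"], "U": ["U"],
--     "V": ["AH"], "Z": ["ZH"], "aU": ["AH", "W"], "b": ["B"], "d": ["D"],
--     "dZ": ["JH"], "f": ["F"], "g": ["G"], "h": ["H"], "i": ["I"],
--     "j": ["J"], "k": ["K"], "l": ["L"], "m": ["M"], "n": ["N"],
--     "p": ["P"], "r": ["R"], "r=": ["R"], "s": ["S"], "t": ["T"],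
--     "tS": ["CH"], "u": ["U"], "v": ["V"], "w": ["W"], "z": ["Z"],
--     "{": ["AE"],
-- }
--
--
-- def normalize_mary_phone_string(raw: str) -> tuple[list[str], list[int], list[str]]:
--     # Phase one: resolve each phoneme to (mapped tokens, stressed?) entries.
--     entries: list[tuple[list[str], bool]] = []
--     unknown_tokens: list[str] = []
--     pending = False
--     for tok in raw.split():
--         if tok == "-":
--             continue
--         if tok == "'":
--             pending = True
--             continue
--         mapped = MARY_PHONE_MAP.get(tok)
--         if mapped is None:
--             unknown_tokens.append(tok)
--             mapped = ["?" + tok]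
--         entries.append((mapped, pending))
--         pending = False
--     # Phase two: flatten, recording the index of the first token of each
--     # stressed entry.
--     tokens: list[str] = []
--     stress_positions: list[int] = []
--     for mapped, stressed in entries:
--         if stressed:
--             stress_positions.append(len(tokens))
--         tokens.extend(mapped)
--     return tokens, stress_positions, unknown_tokens
-- ===== Notes on version B (the rewrite author's own statement) =====
-- stated objective: alternative
-- what changed: B replaces A's single pass that weaves stress bookkeeping into the per-mapped-token loop by a two-phase decomposition: phase one resolves each phoneme to a (mapped tokens, stressed?) entry while collecting unknowns, phase two flattens the entries and records the index of the first token of each stressed entry.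
import Mathlib
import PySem

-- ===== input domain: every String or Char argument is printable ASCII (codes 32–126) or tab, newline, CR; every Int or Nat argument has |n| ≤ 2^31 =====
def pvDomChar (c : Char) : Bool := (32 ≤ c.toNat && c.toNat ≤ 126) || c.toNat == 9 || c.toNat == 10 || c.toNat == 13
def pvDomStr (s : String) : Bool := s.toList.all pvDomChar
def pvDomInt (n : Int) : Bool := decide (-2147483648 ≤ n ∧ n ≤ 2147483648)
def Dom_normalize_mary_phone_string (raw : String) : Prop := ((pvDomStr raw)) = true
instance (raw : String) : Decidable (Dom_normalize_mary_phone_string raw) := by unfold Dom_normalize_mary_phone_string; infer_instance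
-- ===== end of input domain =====

-- B replaces A's single pass with stress bookkeeping woven into the token loop by a
-- two-phase decomposition (resolve phonemes to (mapped, stressed?) entries, then
-- flatten recording stress indices); objective: alternative decomposition, same cost.

-- shared module constant MARY_PHONE_MAP (used by both Pythons)
def maryPhoneMap : PySem.Dict String (List String) :=
  PySem.Dict.ofList [("@", ["SCHWA"]), ("@U", ["OH", "W"]), ("A", ["A"]),
    ("AI", ["AH", "J"]), ("D", ["DH"]), ("E", ["EH"]), ("EI", ["E", "J"]),
    ("I", ["IH"]), ("N", ["NG"]), ("O", ["OH"]), ("OI", ["OH", "J"]),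
    ("S", ["SH"]), ("T", ["TH"]), ("U", ["U"]), ("V", ["AH"]), ("Z", ["ZH"]),
    ("aU", ["AH", "W"]), ("b", ["B"]), ("d", ["D"]), ("dZ", ["JH"]),
    ("f", ["F"]), ("g", ["G"]), ("h", ["H"]), ("i", ["I"]), ("j", ["J"]),
    ("k", ["K"]), ("l", ["L"]), ("m", ["M"]), ("n", ["N"]), ("p", ["P"]),
    ("r", ["R"]), ("r=", ["R"]), ("s", ["S"]), ("t", ["T"]), ("tS", ["CH"]),
    ("u", ["U"]), ("v", ["V"]), ("w", ["W"]), ("z", ["Z"]), ("{", ["AE"])]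

-- ===== PORT A =====
-- inner 'for mapped_token in mapped' loop; state (tokens, stress_positions, stress_next)
def normInnerA (t : List String × List Int × Bool) (mt : String) :
    List String × List Int × Bool :=
  let tokens := t.1 ++ [mt]
  if t.2.2 then (tokens, t.2.1 ++ [(tokens.length : Int) - 1], false)
  else (tokens, t.2.1, t.2.2)

-- body of 'for raw_token in raw.split()'; state (tokens, stress_positions, unknown_tokens, stress_next)
def normStepA (s : List String × List Int × List String × Bool) (raw_token : String) :
    List String × List Int × List String × Bool :=
  let token := PySem.Str.strip raw_token
  if token = "" ∨ token = "-" then s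
  else if token = "'" then (s.1, s.2.1, s.2.2.1, true)
  else
    let um : List String × List String :=
      match maryPhoneMap.get? token with
      | none => (s.2.2.1 ++ [token], ["?" ++ token])   -- f"?{token}"
      | some m => (s.2.2.1, m)
    let inner := um.2.foldl normInnerA (s.1, s.2.1, s.2.2.2)
    (inner.1, inner.2.1, um.1, inner.2.2)

def normalize_mary_phone_string (raw : String) : List String × List Int × List String :=
  let st := (PySem.Str.split₀ raw).foldl normStepA ([], [], [], false)
  (st.1, st.2.1, st.2.2.1)

-- ===== PORT B =====
-- phase-one body; state (entries, unknown_tokens, pending)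
def normStepB (s : List (List String × Bool) × List String × Bool) (tok : String) :
    List (List String × Bool) × List String × Bool :=
  if tok = "-" then s
  else if tok = "'" then (s.1, s.2.1, true)
  else
    match maryPhoneMap.get? tok with
    | none => (s.1 ++ [(["?" ++ tok], s.2.2)], s.2.1 ++ [tok], false)
    | some m => (s.1 ++ [(m, s.2.2)], s.2.1, false)

-- phase-two body; state (tokens, stress_positions)
def flatStep (t : List String × List Int) (e : List String × Bool) :
    List String × List Int :=
  let stress := if e.2 then t.2 ++ [(t.1.length : Int)] else t.2
  (t.1 ++ e.1, stress)

def normalize_mary_phone_string_alt (raw : String) : List String × List Int × List String :=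
  let p := (PySem.Str.split₀ raw).foldl normStepB ([], [], false)
  let r := p.1.foldl flatStep ([], [])
  (r.1, r.2, p.2.1)

-- ===== PRECONDITION & SPEC =====
def Spec_normalize_mary_phone_string (raw : String) (out : List String × List Int × List String) : Prop := out = normalize_mary_phone_string_alt raw
instance (raw : String) (out : List String × List Int × List String) : Decidable (Spec_normalize_mary_phone_string raw out) := by unfold Spec_normalize_mary_phone_string; infer_instance

-- ===== CLAIM (what is proved, stated in full; the proofs are below) =====
def Claim_equal_normalize_mary_phone_string : Prop := ∀ (raw : String), Dom_normalize_mary_phone_string raw → Spec_normalize_mary_phone_string raw (normalize_mary_phone_string raw)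

-- ===== LEMMAS AND PROOFS =====

-- words produced by str.split() are nonempty and contain no whitespace
def pvWordlike (w : String) : Prop := w.toList ≠ [] ∧ ∀ c ∈ w.toList, PySem.Chars.isspace c = false

theorem split₀_go_wordlike (s : List Char) : ∀ (cur : List Char) (acc : List (List Char)),
    (∀ c ∈ cur, PySem.Chars.isspace c = false) →
    (∀ w ∈ acc, w ≠ [] ∧ ∀ c ∈ w, PySem.Chars.isspace c = false) →
    ∀ w ∈ PySem.Chars.split₀.go s cur acc, w ≠ [] ∧ ∀ c ∈ w, PySem.Chars.isspace c = false := by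
  induction s with
  | nil =>
    intro cur acc hcur hacc w hw
    simp only [PySem.Chars.split₀.go] at hw
    split at hw
    · simp only [List.mem_reverse] at hw; exact hacc w hw
    · rename_i hne
      simp only [List.mem_reverse, List.mem_cons] at hw
      rcases hw with h | h
      · subst h
        constructor
        · simp only [ne_eq, List.reverse_eq_nil_iff]
          intro hc; simp [hc] at hne
        · intro c hc; exact hcur c (List.mem_reverse.mp hc)
      · exact hacc w h
  | cons c rest ih =>
    intro cur acc hcur hacc w hw
    simp only [PySem.Chars.split₀.go] at hw
    split at hw
    · split at hw
      · exact ih [] acc (by simp) hacc w hw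
      · rename_i hsp hne
        refine ih [] (cur.reverse :: acc) (by simp) ?_ w hw
        intro v hv
        rcases List.mem_cons.mp hv with h | h
        · subst h
          refine ⟨by simpa using fun hc => hne (by simp [hc]), ?_⟩
          intro d hd; exact hcur d (List.mem_reverse.mp hd)
        · exact hacc v h
    · rename_i hsp
      refine ih (c :: cur) acc ?_ hacc w hw
      intro d hd
      rcases List.mem_cons.mp hd with h | h
      · subst h; simpa using hsp
      · exact hcur d h

theorem split₀_wordlike (raw : String) : ∀ w ∈ PySem.Str.split₀ raw, pvWordlike w := by
  intro w hw
  simp only [PySem.Str.split₀, List.mem_map] at hw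
  obtain ⟨l, hl, rfl⟩ := hw
  have := split₀_go_wordlike raw.toList [] [] (by simp) (by simp) l hl
  exact ⟨by simpa using this.1, by simpa using this.2⟩

theorem strip_wordlike (w : String) (h : pvWordlike w) : PySem.Str.strip w = w := by
  apply String.toList_inj.mp
  have hd : w.toList.dropWhile PySem.Chars.isspace = w.toList := by
    cases hw : w.toList with
    | nil => simp
    | cons c rest =>
      have : PySem.Chars.isspace c = false := h.2 c (by simp [hw])
      simp [this]
  have hr : w.toList.reverse.dropWhile PySem.Chars.isspace = w.toList.reverse := by
    cases hw : w.toList.reverse with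
    | nil => simp
    | cons c rest =>
      have hc : c ∈ w.toList := by
        have : c ∈ w.toList.reverse := by simp [hw]
        simpa using this
      simp [h.2 c hc]
  simp [PySem.Str.toList_strip, PySem.Chars.strip, PySem.Chars.lstrip, PySem.Chars.rstrip, hd, hr]

set_option maxRecDepth 8192 in
theorem map_values_nonempty (k : String) (m : List String)
    (h : maryPhoneMap.get? k = some m) : m ≠ [] := by
  have hmem := PySem.Dict.mem_items_of_get?_eq_some maryPhoneMap h
  have hall : maryPhoneMap.items.all (fun p => !p.2.isEmpty) = true := by decide
  have := (List.all_eq_true.mp hall) _ hmem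
  simpa using this

theorem innerA_false (rest : List String) : ∀ (T : List String) (S : List Int),
    rest.foldl normInnerA (T, S, false) = (T ++ rest, S, false) := by
  induction rest with
  | nil => intro T S; simp
  | cons x xs ih =>
    intro T S
    simp only [List.foldl_cons, normInnerA]
    simpa using ih (T ++ [x]) S

theorem innerA_run (m : List String) (hm : m ≠ []) (T : List String) (S : List Int) (p : Bool) :
    m.foldl normInnerA (T, S, p) =
      (T ++ m, S ++ (if p then [(T.length : Int)] else []), false) := by
  cases m with
  | nil => exact absurd rfl hm
  | cons x xs =>
    cases p with
    | false => simpa using innerA_false (x :: xs) T S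
    | true =>
      simp only [List.foldl_cons, normInnerA, if_pos]
      have := innerA_false xs (T ++ [x]) (S ++ [(T.length : Int)])
      simpa [add_comm] using this

theorem flat_append (entries : List (List String × Bool)) (m : List String) (p : Bool) :
    (entries ++ [(m, p)]).foldl flatStep ([], [])
      = ((entries.foldl flatStep ([], [])).1 ++ m,
         (entries.foldl flatStep ([], [])).2
           ++ (if p then [((entries.foldl flatStep ([], [])).1.length : Int)] else [])) := by
  rw [List.foldl_append]
  simp only [List.foldl_cons, List.foldl_nil, flatStep]
  cases p <;> simp

set_option maxRecDepth 16384 in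
set_option maxHeartbeats 2000000 in
theorem main_invariant (ts : List String) (H : ∀ t ∈ ts, pvWordlike t) :
    ∀ (entries : List (List String × Bool)) (unknown : List String) (pending : Bool),
    ts.foldl normStepA
        ((entries.foldl flatStep ([], [])).1, (entries.foldl flatStep ([], [])).2,
          unknown, pending)
      = (((ts.foldl normStepB (entries, unknown, pending)).1.foldl flatStep ([], [])).1,
         ((ts.foldl normStepB (entries, unknown, pending)).1.foldl flatStep ([], [])).2,
         (ts.foldl normStepB (entries, unknown, pending)).2.1,
         (ts.foldl normStepB (entries, unknown, pending)).2.2) := by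
  induction ts with
  | nil => intro entries unknown pending; simp
  | cons t ts ih =>
    intro entries unknown pending
    have hw : pvWordlike t := H t (List.mem_cons_self ..)
    have hts : ∀ u ∈ ts, pvWordlike u := fun u hu => H u (List.mem_cons_of_mem _ hu)
    have hstrip : PySem.Str.strip t = t := strip_wordlike t hw
    have hne : t ≠ "" := by
      intro h; exact hw.1 (by simp [h])
    simp only [List.foldl_cons]
    by_cases hdash : t = "-"
    · rw [show normStepA ((entries.foldl flatStep ([], [])).1, (entries.foldl flatStep ([], [])).2, unknown, pending) t
            = ((entries.foldl flatStep ([], [])).1, (entries.foldl flatStep ([], [])).2, unknown, pending) from by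
          simp only [normStepA]; rw [hstrip]; rw [if_pos (Or.inr hdash)]]
      rw [show normStepB (entries, unknown, pending) t = (entries, unknown, pending) from by
          simp only [normStepB]; rw [if_pos hdash]]
      exact ih hts entries unknown pending
    · by_cases hq : t = "'"
      · rw [show normStepA ((entries.foldl flatStep ([], [])).1, (entries.foldl flatStep ([], [])).2, unknown, pending) t
              = ((entries.foldl flatStep ([], [])).1, (entries.foldl flatStep ([], [])).2, unknown, true) from by
            simp only [normStepA]; rw [hstrip]; rw [if_neg (by simp [hne, hdash]), if_pos hq]]
        rw [show normStepB (entries, unknown, pending) t = (entries, unknown, true) from by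
            simp only [normStepB]; rw [if_neg hdash, if_pos hq]]
        exact ih hts entries unknown true
      · cases hget : maryPhoneMap.get? t with
        | none =>
          have hm : (["?" ++ t] : List String) ≠ [] := by simp
          rw [show normStepA ((entries.foldl flatStep ([], [])).1, (entries.foldl flatStep ([], [])).2, unknown, pending) t
                = ((entries.foldl flatStep ([], [])).1 ++ ["?" ++ t],
                   (entries.foldl flatStep ([], [])).2 ++ (if pending then [((entries.foldl flatStep ([], [])).1.length : Int)] else []),
                   unknown ++ [t], false) from by
              simp only [normStepA]; rw [hstrip]
              rw [if_neg (by simp [hne, hdash]), if_neg hq]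
              simp [hget, innerA_run _ hm]]
          rw [show normStepB (entries, unknown, pending) t = (entries ++ [(["?" ++ t], pending)], unknown ++ [t], false) from by
              simp only [normStepB]; rw [if_neg hdash, if_neg hq]; simp [hget]]
          have h2 := ih hts (entries ++ [(["?" ++ t], pending)]) (unknown ++ [t]) false
          rw [flat_append] at h2
          exact h2
        | some m =>
          have hm := map_values_nonempty t m hget
          rw [show normStepA ((entries.foldl flatStep ([], [])).1, (entries.foldl flatStep ([], [])).2, unknown, pending) t
                = ((entries.foldl flatStep ([], [])).1 ++ m,
                   (entries.foldl flatStep ([], [])).2 ++ (if pending then [((entries.foldl flatStep ([], [])).1.length : Int)] else []),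
                   unknown, false) from by
              simp only [normStepA]; rw [hstrip]
              rw [if_neg (by simp [hne, hdash]), if_neg hq]
              rw [hget]
              rw [innerA_run m hm]]
          rw [show normStepB (entries, unknown, pending) t = (entries ++ [(m, pending)], unknown, false) from by
              simp only [normStepB]; rw [if_neg hdash, if_neg hq]; simp [hget]]
          have h2 := ih hts (entries ++ [(m, pending)]) unknown false
          rw [flat_append] at h2
          exact h2

-- ===== VERDICT (by name: the statement is the Claim_ definition above) =====
theorem normalize_mary_phone_string_spec : Claim_equal_normalize_mary_phone_string := by
  intro raw _
  unfold Spec_normalize_mary_phone_string normalize_mary_phone_string normalize_mary_phone_string_alt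
  have h := main_invariant (PySem.Str.split₀ raw) (split₀_wordlike raw) [] [] false
  simp only [List.foldl_nil] at h
  simp [h]
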